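-- pv_equiv track=rewrite | github.com/rookiemann/AgentNate | backend/tools/agent_tools.py | _extract_recent_messages
-- ===== SOURCE A (Python) =====
-- from typing import Dict, Any, Optional, List
--
-- def _extract_recent_messages(messages: List[Dict[str, Any]], max_items: int = 8,
--                              max_chars: int = 1200) -> str:
--     if not messages:
--         return ""
--     clipped = messages[-max_items:]
--     lines = []
--     budget = max_chars
--     for m in clipped:
--         role = m.get("role", "unknown")
--         content = (m.get("content") or "").strip().replace("\n", " ")
--         if not content:
--             continue
--         content = content[:300]
--         line = f"{role}: {content}"
--         if len(line) > budget:
--             break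
--         lines.append(line)
--         budget -= len(line)
--         if budget <= 0:
--             break
--     return "\n".join(lines)
-- ===== SOURCE B (Python) =====
-- def _extract_recent_messages(messages, max_items=8, max_chars=1200):
--     # Pass 1: format candidate lines (role + cleaned/truncated content), skipping empties.
--     cands = []
--     for m in messages[-max_items:]:
--         content = (m.get("content") or "").strip().replace("\n", " ")
--         if content:
--             cands.append(f'{m.get("role", "unknown")}: {content[:300]}')
--     # Pass 2: prefix-sum cutoff — keep lines while the running total stays within max_chars.
--     total = 0
--     keep = 0
--     for line in cands:
--         total += len(line)
--         if total > max_chars: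
--             break
--         keep += 1
--     return "\n".join(cands[:keep])
-- ===== Notes on version B (the rewrite author's own statement) =====
-- stated objective: simpler
-- what changed: Replaces the single mutable running-budget loop (decrementing budget, two break conditions) with two plain passes: one pass formats candidate lines, a second prefix-sum pass counts how many lines fit within max_chars, then joins that prefix.
import Mathlib
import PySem

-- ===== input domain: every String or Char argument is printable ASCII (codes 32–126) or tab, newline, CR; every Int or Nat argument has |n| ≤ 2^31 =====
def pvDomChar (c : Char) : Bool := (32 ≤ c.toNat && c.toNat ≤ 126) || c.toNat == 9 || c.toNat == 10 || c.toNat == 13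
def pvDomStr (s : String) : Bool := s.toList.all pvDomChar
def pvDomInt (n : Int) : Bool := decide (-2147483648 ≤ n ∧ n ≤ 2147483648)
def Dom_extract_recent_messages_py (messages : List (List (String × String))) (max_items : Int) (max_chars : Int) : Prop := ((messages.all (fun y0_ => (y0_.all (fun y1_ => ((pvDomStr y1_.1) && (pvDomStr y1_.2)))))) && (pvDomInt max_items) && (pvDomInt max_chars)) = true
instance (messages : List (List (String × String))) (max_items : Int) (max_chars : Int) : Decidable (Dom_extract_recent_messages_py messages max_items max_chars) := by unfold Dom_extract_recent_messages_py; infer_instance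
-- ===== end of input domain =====

-- B replaces A's mutable running-budget loop (two break conditions) with two plain passes:
-- format candidate lines, then a prefix-sum cutoff; objective: simpler decomposition. Return values proved equal.

-- ===== PORT A =====
-- A's for-loop with breaks, as structural recursion over the clipped list carrying the remaining budget.
def pvALoop : List (List (String × String)) → Int → List String
  | [], _ => []
  | m :: rest, budget =>
    let role := PySem.Dict.getD (PySem.Dict.mk m) "role" "unknown"
    -- (m.get("content") or ""): values are strings, so `or ""` coincides with .get("content", "")
    let content := PySem.Str.replace (PySem.Str.strip (((PySem.Dict.mk m).get? "content").getD "")) "\n" " "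
    if content = "" then pvALoop rest budget
    else
      let content2 := PySem.Str.slice content none (some 300)
      let line := role ++ ": " ++ content2
      if (PySem.Str.len line : Int) > budget then []
      else
        line :: (if budget - (PySem.Str.len line : Int) ≤ 0 then []
                 else pvALoop rest (budget - (PySem.Str.len line : Int)))

def extract_recent_messages_py (messages : List (List (String × String))) (max_items : Int) (max_chars : Int) : String :=
  if messages = [] then ""
  else PySem.Str.join "\n" (pvALoop (PySem.List.slice messages (some (-max_items)) none) max_chars)

-- ===== PORT B =====
-- B pass 1: format one message into an optional candidate line.
def pvFmt (m : List (String × String)) : Option String :=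
  let content := PySem.Str.replace (PySem.Str.strip (((PySem.Dict.mk m).get? "content").getD "")) "\n" " "
  if content = "" then none
  else some (PySem.Dict.getD (PySem.Dict.mk m) "role" "unknown" ++ ": " ++ PySem.Str.slice content none (some 300))

def pvBCands : List (List (String × String)) → List String
  | [] => []
  | m :: rest =>
    match pvFmt m with
    | some l => l :: pvBCands rest
    | none => pvBCands rest

-- B pass 2: how many leading lines keep the running total of lengths within max_chars.
def pvBKeep : List String → Int → Int → Nat
  | [], _, _ => 0
  | l :: rest, total, maxc =>
    if total + (PySem.Str.len l : Int) > maxc then 0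
    else 1 + pvBKeep rest (total + (PySem.Str.len l : Int)) maxc

def extract_recent_messages_py_alt (messages : List (List (String × String))) (max_items : Int) (max_chars : Int) : String :=
  let cands := pvBCands (PySem.List.slice messages (some (-max_items)) none)
  PySem.Str.join "\n" (cands.take (pvBKeep cands 0 max_chars))

-- ===== PRECONDITION & SPEC =====
def Spec_extract_recent_messages_py (messages : List (List (String × String))) (max_items : Int) (max_chars : Int) (out : String) : Prop := out = extract_recent_messages_py_alt messages max_items max_chars
instance (messages : List (List (String × String))) (max_items : Int) (max_chars : Int) (out : String) : Decidable (Spec_extract_recent_messages_py messages max_items max_chars out) := by unfold Spec_extract_recent_messages_py; infer_instance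

-- ===== CLAIM (what is proved, stated in full; the proofs are below) =====
def Claim_equal_extract_recent_messages_py : Prop := ∀ (messages : List (List (String × String))) (max_items : Int) (max_chars : Int), Dom_extract_recent_messages_py messages max_items max_chars → Spec_extract_recent_messages_py messages max_items max_chars (extract_recent_messages_py messages max_items max_chars)

-- ===== LEMMAS AND PROOFS =====

-- every candidate line has positive length (it contains ": ")
lemma pvFmt_pos (m : List (String × String)) (l : String) (h : pvFmt m = some l) :
    0 < (PySem.Str.len l : Int) := by
  simp only [pvFmt] at h
  split at h
  · exact absurd h (by simp)
  · cases h
    simp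
    omega

lemma pvBCands_pos (ms : List (List (String × String))) :
    ∀ l ∈ pvBCands ms, 0 < (PySem.Str.len l : Int) := by
  induction ms with
  | nil => intro l hl; simp [pvBCands] at hl
  | cons m rest ih =>
    intro l hl
    unfold pvBCands at hl
    cases h : pvFmt m with
    | none => rw [h] at hl; exact ih l hl
    | some l' =>
      rw [h] at hl
      rcases List.mem_cons.mp hl with rfl | hl
      · exact pvFmt_pos m l h
      · exact ih l hl

-- the core correspondence: A's budget loop produces exactly the prefix-sum-selected prefix of B's candidates
lemma pvALoop_eq (ms : List (List (String × String))) :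
    ∀ total maxc : Int,
      pvALoop ms (maxc - total) = (pvBCands ms).take (pvBKeep (pvBCands ms) total maxc) := by
  induction ms with
  | nil => intro total maxc; simp [pvALoop, pvBCands, pvBKeep]
  | cons m rest ih =>
    intro total maxc
    set c := PySem.Str.replace (PySem.Str.strip (((PySem.Dict.mk m).get? "content").getD "")) "\n" " " with hc
    set l := PySem.Dict.getD (PySem.Dict.mk m) "role" "unknown" ++ ": " ++ PySem.Str.slice c none (some 300) with hl
    by_cases hC : c = ""
    · have hfmt : pvFmt m = none := by simp only [pvFmt, ← hc, hC, reduceIte]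
      have hA : pvALoop (m :: rest) (maxc - total) = pvALoop rest (maxc - total) := by
        simp only [pvALoop, ← hc, hC, reduceIte]
      rw [hA]
      simp only [pvBCands, hfmt]
      exact ih total maxc
    · have hfmt : pvFmt m = some l := by
        simp only [pvFmt, ← hc, ← hl, if_neg hC]
      have hA : pvALoop (m :: rest) (maxc - total) =
          if (PySem.Str.len l : Int) > maxc - total then []
          else l :: (if maxc - total - (PySem.Str.len l : Int) ≤ 0 then []
                     else pvALoop rest (maxc - total - (PySem.Str.len l : Int))) := by
        simp only [pvALoop, ← hc, ← hl, if_neg hC]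
      rw [hA]
      simp only [pvBCands, hfmt]
      unfold pvBKeep
      by_cases hbig : (PySem.Str.len l : Int) > maxc - total
      · have h1 : total + (PySem.Str.len l : Int) > maxc := by omega
        rw [if_pos hbig, if_pos h1]
        simp
      · have h2 : ¬ total + (PySem.Str.len l : Int) > maxc := by omega
        rw [if_neg hbig, if_neg h2, Nat.add_comm, List.take_succ_cons]
        refine congrArg (List.cons l) ?_
        by_cases hzero : maxc - total - (PySem.Str.len l : Int) ≤ 0
        · rw [if_pos hzero]
          cases hcands : pvBCands rest with
          | nil => simp
          | cons l' tl =>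
            have hpos : 0 < (PySem.Str.len l' : Int) := by
              apply pvBCands_pos rest; rw [hcands]; exact List.mem_cons_self ..
            unfold pvBKeep
            have h3 : total + (PySem.Str.len l : Int) + (PySem.Str.len l' : Int) > maxc := by omega
            rw [if_pos h3]
            simp
        · rw [if_neg hzero]
          have harg : maxc - total - (PySem.Str.len l : Int) = maxc - (total + (PySem.Str.len l : Int)) := by ring
          rw [harg, ih (total + (PySem.Str.len l : Int)) maxc]

-- ===== VERDICT (by name: the statement is the Claim_ definition above) =====
theorem extract_recent_messages_py_spec : Claim_equal_extract_recent_messages_py := by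
  intro messages max_items max_chars _
  unfold Spec_extract_recent_messages_py extract_recent_messages_py extract_recent_messages_py_alt
  by_cases hm : messages = []
  · subst hm
    simp [PySem.List.slice, pvBCands, pvBKeep, PySem.Str.join]
  · simp only [hm, reduceIte]
    have h := pvALoop_eq (PySem.List.slice messages (some (-max_items)) none) 0 max_chars
    rw [show max_chars - 0 = max_chars by ring] at h
    rw [h]
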